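-- pv_equiv track=rewrite | github.com/communikein/Advent-of-Code | 2020/day-18/python/solution-1.py | find_innermost_group
-- ===== SOURCE A (Python) =====
-- OP_OPEN_PAR = '('
--
-- OP_CLOSE_PAR = ')'
--
-- def find_innermost_group(elements):
--
-- 	index_open_par = 0
-- 	index_close_par = len(elements)
--
-- 	if OP_OPEN_PAR not in elements:
-- 		return elements, (index_open_par, index_close_par)
--
-- 	index = 0
-- 	for el in elements:
--
-- 		if el == OP_OPEN_PAR:
-- 			index_open_par = index
--
-- 		if el == OP_CLOSE_PAR:
-- 			index_close_par = index
-- 			break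
--
-- 		index += 1
--
-- 	return elements[index_open_par+1:index_close_par], (index_open_par, index_close_par+1)
-- ===== SOURCE B (Python) =====
-- def find_innermost_group(elements):
--     if '(' not in elements:
--         return elements, (0, len(elements))
--     try:
--         close = elements.index(')')
--     except ValueError:
--         close = len(elements)
--     open_idx = 0
--     for i in range(close - 1, -1, -1):
--         if elements[i] == '(':
--             open_idx = i
--             break
--     return elements[open_idx+1:close], (open_idx, close+1)
-- ===== Notes on version B (the rewrite author's own statement) =====
-- stated objective: alternative
-- what changed: A's single forward pass tracking open and close parentheses simultaneously with a break is replaced by two separate scans: elements.index(')') to find the close paren (defaulting to len), then a backward loop from close-1 finding the nearest preceding '('.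
import Mathlib
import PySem

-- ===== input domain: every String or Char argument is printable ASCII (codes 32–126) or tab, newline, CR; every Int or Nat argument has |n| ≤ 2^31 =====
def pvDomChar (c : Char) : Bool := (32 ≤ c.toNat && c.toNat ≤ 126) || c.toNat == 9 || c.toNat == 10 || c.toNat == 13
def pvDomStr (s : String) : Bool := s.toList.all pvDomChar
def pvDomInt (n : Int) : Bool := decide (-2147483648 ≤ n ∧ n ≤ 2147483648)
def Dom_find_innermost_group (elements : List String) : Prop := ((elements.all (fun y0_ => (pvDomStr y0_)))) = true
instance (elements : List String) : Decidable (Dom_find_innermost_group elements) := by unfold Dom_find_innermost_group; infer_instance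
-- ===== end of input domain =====

-- B replaces A's single simultaneous forward scan (tracking open and close at once, with break)
-- by two separate scans: elements.index(')') for the close paren, then a backward loop for the
-- nearest preceding '('. Objective: alternative decomposition; same cost.

-- ===== PORT A =====
-- A's for-loop with break: structural recursion over the list carrying (open, close, index).
def find_innermost_group_loop : List String → Int → Int → Int → Int × Int
  | [], o, c, _ => (o, c)
  | el :: rest, o, c, i =>
    let o' := if el = "(" then i else o
    if el = ")" then (o', i)
    else find_innermost_group_loop rest o' c (i + 1)

def find_innermost_group (elements : List String) : List String × (Int × Int) :=
  if ¬ elements.contains "(" then (elements, (0, (elements.length : Int)))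
  else
    let oc := find_innermost_group_loop elements 0 (elements.length : Int) 0
    (PySem.List.slice elements (some (oc.1 + 1)) (some oc.2), (oc.1, oc.2 + 1))

-- ===== PORT B =====
-- B's backward for-loop over range(close-1, -1, -1) with break.
def find_innermost_group_alt_back (elements : List String) : List Int → Int → Int
  | [], o => o
  | i :: rest, o =>
    if PySem.List.pyGetD elements i "" = "(" then i
    else find_innermost_group_alt_back elements rest o

def find_innermost_group_alt (elements : List String) : List String × (Int × Int) :=
  if ¬ elements.contains "(" then (elements, (0, (elements.length : Int)))
  else
    let close : Int :=
      match PySem.List.index? elements ")" with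
      | some j => (j : Int)
      | none => (elements.length : Int)
    let open_idx := find_innermost_group_alt_back elements (PySem.List.pyRange (close - 1) (-1) (-1)) 0
    (PySem.List.slice elements (some (open_idx + 1)) (some close), (open_idx, close + 1))

-- ===== PRECONDITION & SPEC =====
def Spec_find_innermost_group (elements : List String) (out : List String × (Int × Int)) : Prop := out = find_innermost_group_alt elements
instance (elements : List String) (out : List String × (Int × Int)) : Decidable (Spec_find_innermost_group elements out) := by unfold Spec_find_innermost_group; infer_instance

-- ===== CLAIM (what is proved, stated in full; the proofs are below) =====
def Claim_equal_find_innermost_group : Prop := ∀ (elements : List String), Dom_find_innermost_group elements → Spec_find_innermost_group elements (find_innermost_group elements)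

-- ===== LEMMAS AND PROOFS =====

-- Index (offset by i, default o) of the last "(" in a list: common characterisation of both loops.
def lastOpen : List String → Int → Int → Int
  | [], o, _ => o
  | el :: rest, o, i => lastOpen rest (if el = "(" then i else o) (i + 1)

lemma lastOpen_append (l : List String) (x : String) (o i : Int) :
    lastOpen (l ++ [x]) o i = if x = "(" then i + (l.length : Int) else lastOpen l o i := by
  induction l generalizing o i with
  | nil => simp [lastOpen]
  | cons el rest ih =>
    simp only [List.cons_append, lastOpen, ih, List.length_cons]
    split_ifs <;> push_cast <;> ring_nf

lemma loop_eq (l : List String) (o c i : Int) :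
    find_innermost_group_loop l o c i =
      match PySem.List.index? l ")" with
      | some j => (lastOpen (l.take j) o i, i + (j : Int))
      | none => (lastOpen l o i, c) := by
  induction l generalizing o i with
  | nil => simp [find_innermost_group_loop, PySem.List.index?, lastOpen]
  | cons el rest ih =>
    by_cases hcl : el = ")"
    · subst hcl
      rw [PySem.List.index?_cons_self]
      simp [find_innermost_group_loop, lastOpen]
    · rw [PySem.List.index?_cons_of_ne rest hcl]
      simp only [find_innermost_group_loop, if_neg hcl, ih]
      cases hidx : PySem.List.index? rest ")" with
      | none => simp [lastOpen]
      | some j =>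
        simp only [Option.map_some, List.take_succ_cons, lastOpen, Prod.mk.injEq]
        push_cast
        exact ⟨trivial, by ring⟩

lemma back_eq (el : List String) (n : Nat) (hn : n ≤ el.length) :
    find_innermost_group_alt_back el (PySem.List.pyRange ((n : Int) - 1) (-1) (-1)) 0
      = lastOpen (el.take n) 0 0 := by
  induction n with
  | zero =>
    rw [PySem.List.pyRange_neg_one_eq_nil (by omega)]
    simp [find_innermost_group_alt_back, lastOpen]
  | succ n ih =>
    have hn' : n < el.length := by omega
    rw [show ((n + 1 : Nat) : Int) - 1 = (n : Int) by push_cast; ring,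
        PySem.List.pyRange_neg_one_cons (by omega)]
    simp only [find_innermost_group_alt_back]
    rw [PySem.List.pyGetD_natCast el n "", List.getD_eq_getElem el "" hn']
    rw [List.take_add_one, List.getElem?_eq_getElem hn']
    simp only [Option.toList_some]
    rw [lastOpen_append, List.length_take_of_le (le_of_lt hn')]
    split_ifs with h
    · simp
    · exact ih (le_of_lt hn')

-- ===== VERDICT (by name: the statement is the Claim_ definition above) =====
theorem find_innermost_group_spec : Claim_equal_find_innermost_group := by
  intro elements _
  unfold Spec_find_innermost_group find_innermost_group find_innermost_group_alt
  by_cases hc : "(" ∈ elements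
  · rw [if_neg (by simp [hc]), if_neg (by simp [hc])]
    rw [loop_eq]
    cases hidx : PySem.List.index? elements ")" with
    | none =>
      have hb := back_eq elements elements.length le_rfl
      rw [List.take_length] at hb
      simp [hb]
    | some j =>
      obtain ⟨hj, -, -⟩ := PySem.List.getElem_of_index?_eq_some hidx
      simp [back_eq elements j (le_of_lt hj)]
  · rw [if_pos (by simp [hc]), if_pos (by simp [hc])]
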